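-- pv_equiv track=rewrite | github.com/yeonnseok/ps-algorithm | 2019 baekjoon/BruteForce/3085_candy_game.py | check
-- ===== SOURCE A (Python) =====
-- def check(n, src):
--     ans = 1
--     for i in range(n):
--         # 행에 대해 최대 길이 구함
--         cnt = 1
--         for j in range(1, n):
--             if src[i][j] == src[i][j-1]:
--                 cnt += 1
--             else:
--                 cnt = 1
--             if ans < cnt: ans = cnt
--         # 열에 대해 최대 길이 구함
--         cnt = 1
--         for j in range(1, n):
--             if src[j][i] == src[j-1][i]:
--                 cnt += 1
--             else:
--                 cnt = 1
--             if ans < cnt: ans = cnt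
--     return ans
-- ===== SOURCE B (Python) =====
-- def line_max(line):
--     """Longest run of equal consecutive elements: the widest gap
--     between consecutive change points (indices where the value changes)."""
--     m = len(line)
--     if m == 0:
--         return 0
--     cuts = [0] + [k for k in range(1, m) if line[k] != line[k - 1]] + [m]
--     return max(b - a for a, b in zip(cuts, cuts[1:]))
--
--
-- def check(n, src):
--     rows = [[src[i][j] for j in range(n)] for i in range(n)]
--     cols = [[src[j][i] for j in range(n)] for i in range(n)]
--     best = 1
--     for line in rows + cols:
--         best = max(best, line_max(line))
--     return best
-- ===== Notes on version B (the rewrite author's own statement) =====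
-- stated objective: alternative
-- what changed: B computes each line's longest run as the widest gap between change-point indices (the boundaries where adjacent cells differ) over explicitly built row and column lists, replacing A's interleaved running counter with reset; Pre_ excludes the inputs where A raises IndexError and additionally n=1 grids missing their single cell, where A returns 1 without reading the grid but B naturally reads the cell and raises.
-- outside the precondition, e.g. on check(1, []): A returns 1, B raises IndexError
import Mathlib
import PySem

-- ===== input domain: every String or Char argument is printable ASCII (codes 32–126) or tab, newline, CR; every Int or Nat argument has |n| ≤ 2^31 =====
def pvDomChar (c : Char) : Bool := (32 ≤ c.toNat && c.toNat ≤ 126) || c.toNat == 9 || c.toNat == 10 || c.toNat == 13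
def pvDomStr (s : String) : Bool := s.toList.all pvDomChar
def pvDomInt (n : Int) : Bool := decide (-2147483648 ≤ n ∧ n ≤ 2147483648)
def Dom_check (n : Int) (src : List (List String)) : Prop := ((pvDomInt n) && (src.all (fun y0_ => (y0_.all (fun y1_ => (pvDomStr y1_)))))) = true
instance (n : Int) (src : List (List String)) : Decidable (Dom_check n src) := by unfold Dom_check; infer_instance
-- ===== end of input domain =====

-- B computes each line's longest run as the widest gap between consecutive change points
-- (boundaries where adjacent cells differ), instead of A's running counter (objective: alternative).

-- ===== PORT A =====
def check (n : Int) (src : List (List String)) : Int :=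
  (PySem.List.pyRange 0 n).foldl (fun ans i =>
    let ansRow :=
      ((PySem.List.pyRange 1 n).foldl (fun (st : Int × Int) j =>
        let cnt := if PySem.List.pyGetD (PySem.List.pyGetD src i []) j "" ==
                      PySem.List.pyGetD (PySem.List.pyGetD src i []) (j - 1) "" then st.1 + 1 else 1
        (cnt, if st.2 < cnt then cnt else st.2)) (1, ans)).2
    ((PySem.List.pyRange 1 n).foldl (fun (st : Int × Int) j =>
        let cnt := if PySem.List.pyGetD (PySem.List.pyGetD src j []) i "" ==
                      PySem.List.pyGetD (PySem.List.pyGetD src (j - 1) []) i "" then st.1 + 1 else 1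
        (cnt, if st.2 < cnt then cnt else st.2)) (1, ansRow)).2) 1

-- ===== PORT B =====
-- B-side helper: line_max(line) — change points [k : line[k] != line[k-1]], widest gap
def lineMax (line : List String) : Int :=
  if line.length = 0 then 0
  else
    let cuts : List Int :=
      0 :: ((PySem.List.pyRange 1 (line.length : Int)).filter
        (fun k => !(PySem.List.pyGetD line k "" == PySem.List.pyGetD line (k - 1) ""))) ++
        [(line.length : Int)]
    match (cuts.zip cuts.tail).map (fun p => p.2 - p.1) with
    | [] => 0            -- unreachable: cuts has at least two entries
    | d :: ds => ds.foldl max d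

def check_alt (n : Int) (src : List (List String)) : Int :=
  let rows := (PySem.List.pyRange 0 n).map (fun i =>
    (PySem.List.pyRange 0 n).map (fun j => PySem.List.pyGetD (PySem.List.pyGetD src i []) j ""))
  let cols := (PySem.List.pyRange 0 n).map (fun i =>
    (PySem.List.pyRange 0 n).map (fun j => PySem.List.pyGetD (PySem.List.pyGetD src j []) i ""))
  (rows ++ cols).foldl (fun best line => max best (lineMax line)) 1

-- ===== PRECONDITION & SPEC =====
-- Pre_ excludes the inputs where the Python A raises IndexError (2 ≤ n with missing rows/cells)
-- and additionally n = 1 grids missing their single cell, where A returns 1 without reading the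
-- grid but B naturally reads the cell and raises IndexError.
def Pre_check (n : Int) (src : List (List String)) : Prop :=
  1 ≤ n → ((n ≤ (src.length : Int)) ∧ ∀ row ∈ src.take n.toNat, n ≤ (row.length : Int))
instance (n : Int) (src : List (List String)) : Decidable (Pre_check n src) := by unfold Pre_check; infer_instance

def pvWitness_check : Int × List (List String) := (2, [["a", "b"], ["a", "a"]])

def Spec_check (n : Int) (src : List (List String)) (out : Int) : Prop := out = check_alt n src
instance (n : Int) (src : List (List String)) (out : Int) : Decidable (Spec_check n src out) := by unfold Spec_check; infer_instance

-- ===== CLAIM (what is proved, stated in full; the proofs are below) =====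
def Claim_equal_check : Prop := ∀ (n : Int) (src : List (List String)), Dom_check n src → Pre_check n src → Spec_check n src (check n src)

-- ===== LEMMAS AND PROOFS =====

lemma if_lt_max (a b : Int) : (if a < b then b else a) = max a b := by
  split <;> omega

-- abstract run-length scanner: state (cnt, best) over the list of "equal to predecessor" flags
def runFold (bs : List Bool) (st : Int × Int) : Int × Int :=
  match bs with
  | [] => st
  | b :: t =>
    let c := if b then st.1 + 1 else 1
    runFold t (c, if st.2 < c then c else st.2)

lemma runFold_false (t : List Bool) (st : Int × Int) :
    runFold (false :: t) st = runFold t (1, if st.2 < 1 then 1 else st.2) := rfl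

lemma runFold_true (t : List Bool) (st : Int × Int) :
    runFold (true :: t) st = runFold t (st.1 + 1, if st.2 < st.1 + 1 then st.1 + 1 else st.2) := rfl

-- A's inner loop is runFold on the flag list
lemma foldA_eq_runFold (f : Int → String) : ∀ (l : List Int) (st : Int × Int),
    List.foldl (fun (st : Int × Int) j =>
      let cnt := if f j == f (j - 1) then st.1 + 1 else 1
      (cnt, if st.2 < cnt then cnt else st.2)) st l
    = runFold (l.map (fun j => f j == f (j - 1))) st := by
  intro l
  induction l with
  | nil => intro st; rfl
  | cons x t ih =>
    intro st
    simp only [List.foldl_cons, List.map_cons, runFold]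
    exact ih _

lemma string_beq_comm (a b : String) : (a == b) = (b == a) := by
  by_cases h : a = b
  · subst h; rfl
  · rw [beq_eq_false_iff_ne.mpr h, beq_eq_false_iff_ne.mpr (Ne.symm h)]

-- the "equal to predecessor" flags of a line
def flagsOf (line : List String) : List Bool :=
  (line.zip line.tail).map (fun p => p.1 == p.2)

-- the pairwise flags of the sampled line equal A's index-based flags
lemma flags_of_fn (n : Int) (f : Int → String) :
    (PySem.List.pyRange 1 n).map (fun j => f j == f (j - 1))
    = flagsOf ((PySem.List.pyRange 0 n).map f) := by
  unfold flagsOf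
  apply List.ext_getElem
  · simp [PySem.List.length_pyRange_one]
  · intro k h1 h2
    simp only [List.getElem_map, List.getElem_zip, List.getElem_tail]
    have hk1 : k < (PySem.List.pyRange 1 n).length := by simpa using h1
    rw [PySem.List.getElem_pyRange_one 1 n k hk1]
    have hk0 : k < (PySem.List.pyRange 0 n).length := by
      simp [PySem.List.length_pyRange_one] at h1 ⊢; omega
    have hk0' : k + 1 < (PySem.List.pyRange 0 n).length := by
      simp [PySem.List.length_pyRange_one] at h1 ⊢; omega
    rw [PySem.List.getElem_pyRange_one 0 n k hk0, PySem.List.getElem_pyRange_one 0 n (k+1) hk0']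
    have e1 : (1 : Int) + k - 1 = 0 + k := by omega
    have e2 : (1 : Int) + k = 0 + ((k + 1 : Nat) : Int) := by push_cast; omega
    rw [e1, e2, string_beq_comm]

-- run lengths of a line, read off its flag list
def gapsOf : List Bool → List Int
  | [] => [1]
  | true :: t =>
    match gapsOf t with
    | [] => [1]
    | h :: r => (h + 1) :: r
  | false :: t => 1 :: gapsOf t

lemma gapsOf_ne_nil (bs : List Bool) : gapsOf bs ≠ [] := by
  induction bs with
  | nil => simp [gapsOf]
  | cons b t ih =>
    cases b
    · simp [gapsOf]
    · cases hg : gapsOf t with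
      | nil => exact absurd hg ih
      | cons h r => simp [gapsOf, hg]

lemma gapsOf_pos (bs : List Bool) : ∀ x ∈ gapsOf bs, 1 ≤ x := by
  induction bs with
  | nil => simp [gapsOf]
  | cons b t ih =>
    cases b
    · intro x hx
      simp only [gapsOf, List.mem_cons] at hx
      rcases hx with rfl | hx
      · norm_num
      · exact ih x hx
    · cases hg : gapsOf t with
      | nil => exact absurd hg (gapsOf_ne_nil t)
      | cons h r =>
        intro x hx
        simp only [gapsOf, hg, List.mem_cons] at hx
        rcases hx with rfl | hx
        · have := ih h (by rw [hg]; exact List.mem_cons_self ..)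
          omega
        · exact ih x (by rw [hg]; exact List.mem_cons_of_mem _ hx)

-- pulling a max out of a running maximum
lemma foldl_max_out : ∀ (l : List Int) (a c : Int),
    List.foldl max (max a c) l = max (List.foldl max a l) c := by
  intro l
  induction l with
  | nil => intro a c; rfl
  | cons x t ih =>
    intro a c
    simp only [List.foldl_cons, max_right_comm a c x]
    exact ih _ _

-- the counter scan computes the maximum of the run lengths
lemma runFold_gapsOf : ∀ (bs : List Bool) (c a h : Int) (r : List Int),
    1 ≤ c → c ≤ a → gapsOf bs = h :: r →
    (runFold bs (c, a)).2 = max a (r.foldl max (c + h - 1)) := by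
  intro bs
  induction bs with
  | nil =>
    intro c a h r hc hca hg
    simp only [gapsOf, List.cons.injEq] at hg
    obtain ⟨rfl, rfl⟩ := hg
    simp only [runFold, List.foldl_nil]
    have e : c + 1 - 1 = c := by omega
    rw [e, max_eq_left hca]
  | cons b t ih =>
    intro c a h r hc hca hg
    obtain ⟨h', r', hg'⟩ := List.exists_cons_of_ne_nil (gapsOf_ne_nil t)
    cases b
    · -- flag false: a new run starts
      simp only [gapsOf, List.cons.injEq] at hg
      obtain ⟨rfl, rfl⟩ := hg
      rw [runFold_false, if_lt_max, max_eq_left (show (1:Int) ≤ a by omega)]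
      rw [ih 1 a h' r' le_rfl (by omega) hg', hg']
      have e1 : (1 : Int) + h' - 1 = h' := by omega
      have e2 : c + 1 - 1 = c := by omega
      rw [e1, e2, List.foldl_cons, max_comm c h', foldl_max_out]
      rw [max_comm (List.foldl max h' r') c, ← max_assoc, max_eq_left hca]
    · -- flag true: the current run is extended
      simp only [gapsOf, hg'] at hg
      obtain ⟨rfl, rfl⟩ := List.cons.injEq .. |>.mp hg
      rw [runFold_true, if_lt_max]
      rw [ih (c+1) (max a (c+1)) h' r' (by omega) (le_max_right _ _) hg']
      have e1 : c + 1 + h' - 1 = c + (h' + 1) - 1 := by omega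
      rw [e1]
      have hh' : 1 ≤ h' := gapsOf_pos t h' (by rw [hg']; exact List.mem_cons_self ..)
      have hF := (PySem.List.le_foldl_max r' (c + (h' + 1) - 1)).1
      rw [max_assoc]
      congr 1
      exact max_eq_right (by omega)

-- positions (from offset i) of the false flags: the change points
def idxFalse : List Bool → Int → List Int
  | [], _ => []
  | true :: t, i => idxFalse t (i + 1)
  | false :: t, i => i :: idxFalse t (i + 1)

lemma filter_pyRange_idxFalse (g : Int → Bool) : ∀ (bs : List Bool) (i : Int),
    (∀ (k : Nat) (hk : k < bs.length), g (i + k) = bs[k]) →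
    (PySem.List.pyRange i (i + bs.length)).filter (fun k => !(g k)) = idxFalse bs i := by
  intro bs
  induction bs with
  | nil =>
    intro i _
    simp only [List.length_nil, Nat.cast_zero, add_zero, idxFalse]
    rw [PySem.List.pyRange_one_eq_nil le_rfl]
    rfl
  | cons b t ih =>
    intro i hgk
    have hlen : i < i + ((t.length : Int) + 1) := by
      have : (0:Int) ≤ t.length := Int.natCast_nonneg _
      omega
    rw [show ((b :: t).length : Int) = (t.length : Int) + 1 by push_cast [List.length_cons]; ring]
    rw [PySem.List.pyRange_one_cons hlen, List.filter_cons]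
    have hgi : g i = b := by
      have := hgk 0 (by simp)
      simpa using this
    have hend : i + ((t.length : Int) + 1) = (i + 1) + (t.length : Int) := by omega
    rw [hend, ih (i + 1) (fun k hk => by
      have := hgk (k + 1) (by simpa using Nat.succ_lt_succ hk)
      have e : i + ((k : Int) + 1) = i + 1 + (k : Int) := by omega
      push_cast at this
      rw [e] at this
      simpa using this)]
    cases b
    · simp [hgi, idxFalse]
    · simp [hgi, idxFalse]

-- consecutive differences
def diffsOf (L : List Int) : List Int := (L.zip L.tail).map (fun p => p.2 - p.1)

lemma diffs_cons_cons (x y : Int) (t : List Int) :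
    diffsOf (x :: y :: t) = (y - x) :: diffsOf (y :: t) := by
  simp [diffsOf]

-- the gaps between change points are the run lengths
lemma diffs_idxFalse : ∀ (bs : List Bool) (i : Int),
    diffsOf (i :: (idxFalse bs (i + 1) ++ [i + 1 + (bs.length : Int)])) = gapsOf bs := by
  intro bs
  induction bs with
  | nil =>
    intro i
    simp only [idxFalse, List.length_nil, Nat.cast_zero, add_zero, List.nil_append, gapsOf]
    simp [diffsOf]
  | cons b t ih =>
    intro i
    have hlen : ((b :: t).length : Int) = (t.length : Int) + 1 := by
      push_cast [List.length_cons]; ring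
    cases b
    · -- change point at i+1
      simp only [idxFalse, List.cons_append]
      rw [hlen, show i + 1 + ((t.length : Int) + 1) = (i + 1) + 1 + (t.length : Int) by ring]
      rw [diffs_cons_cons, ih (i + 1)]
      simp only [gapsOf, List.cons.injEq]
      exact ⟨by omega, trivial⟩
    · -- no change point: first run extends
      simp only [idxFalse]
      obtain ⟨y, t', hrest⟩ : ∃ y t', idxFalse t (i + 1 + 1) ++ [(i + 1) + 1 + (t.length : Int)] = y :: t' :=
        List.exists_cons_of_ne_nil (by simp)
      have hIH := ih (i + 1)
      rw [hrest] at hIH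
      rw [diffs_cons_cons] at hIH
      rw [hlen, show i + 1 + ((t.length : Int) + 1) = (i + 1) + 1 + (t.length : Int) by ring, hrest]
      rw [diffs_cons_cons]
      simp only [gapsOf, ← hIH, List.cons.injEq]
      exact ⟨by omega, trivial⟩

lemma length_flagsOf (x : String) (l : List String) :
    ((x :: l).length : Int) = 1 + ((flagsOf (x :: l)).length : Int) := by
  simp [flagsOf]
  omega

-- B's cuts are the change points of the flag list
lemma cuts_eq (x : String) (l : List String) :
    (PySem.List.pyRange 1 ((x :: l).length : Int)).filter
      (fun k => !(PySem.List.pyGetD (x :: l) k "" == PySem.List.pyGetD (x :: l) (k - 1) ""))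
    = idxFalse (flagsOf (x :: l)) 1 := by
  have hlen := length_flagsOf x l
  rw [show ((x :: l).length : Int) = 1 + ((flagsOf (x :: l)).length : Int) from hlen]
  apply filter_pyRange_idxFalse
  intro k hk
  have hflen : (flagsOf (x :: l)).length = l.length := by simp [flagsOf]
  have hkl : k < l.length := by omega
  have e1 : (1 : Int) + (k : Int) = ((k + 1 : Nat) : Int) := by push_cast; omega
  have e2 : (1 : Int) + (k : Int) - 1 = ((k : Nat) : Int) := by omega
  rw [e1]
  rw [show ((k + 1 : Nat) : Int) - 1 = ((k : Nat) : Int) by push_cast; omega]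
  rw [PySem.List.pyGetD_natCast, PySem.List.pyGetD_natCast]
  rw [List.getD_eq_getElem _ "" (by simp; omega), List.getD_eq_getElem _ "" (by simp; omega)]
  simp only [flagsOf, List.getElem_map, List.getElem_zip, List.getElem_tail]
  rw [string_beq_comm]

-- line_max of a nonempty line is the maximum run length
lemma lineMax_eq (x : String) (l : List String) (h : Int) (r : List Int)
    (hg : gapsOf (flagsOf (x :: l)) = h :: r) :
    lineMax (x :: l) = r.foldl max h := by
  unfold lineMax
  rw [if_neg (by simp)]
  rw [cuts_eq x l]
  have hD := diffs_idxFalse (flagsOf (x :: l)) 0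
  rw [show (0 : Int) + 1 = 1 by norm_num] at hD
  rw [← length_flagsOf x l] at hD
  rw [hg] at hD
  show (match diffsOf (0 :: (idxFalse (flagsOf (x :: l)) 1 ++ [((x :: l).length : Int)])) with
        | [] => (0 : Int)
        | d :: ds => ds.foldl max d) = r.foldl max h
  rw [hD]

-- the counter scan over a line's flags computes max a (lineMax line)
lemma runFold_flags (line : List String) (a : Int) (ha : 1 ≤ a) :
    (runFold (flagsOf line) (1, a)).2 = max a (lineMax line) := by
  cases line with
  | nil =>
    show a = max a (lineMax [])
    rw [show lineMax [] = 0 from rfl]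
    omega
  | cons x l =>
    obtain ⟨h, r, hg⟩ := List.exists_cons_of_ne_nil (gapsOf_ne_nil (flagsOf (x :: l)))
    rw [runFold_gapsOf (flagsOf (x :: l)) 1 a h r le_rfl ha hg]
    rw [lineMax_eq x l h r hg]
    congr 1
    congr 1
    omega

-- A's inner loop over indices computes max a (lineMax of the sampled line)
lemma runFold_row (f : Int → String) (n a : Int) (ha : 1 ≤ a) :
    (runFold ((PySem.List.pyRange 1 n).map (fun j => f j == f (j - 1))) (1, a)).2
    = max a (lineMax ((PySem.List.pyRange 0 n).map f)) := by
  rw [flags_of_fn]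
  exact runFold_flags _ a ha

-- A's outer loop, once each body is a double max, is two running maxima
lemma fold_step_to_max (step : Int → Int → Int) (F G : Int → Int)
    (h : ∀ a i, 1 ≤ a → step a i = max (max a (F i)) (G i)) :
    ∀ (l : List Int) (a : Int), 1 ≤ a →
      List.foldl step a l = List.foldl max (List.foldl max a (l.map F)) (l.map G) := by
  intro l
  induction l with
  | nil => intro a _; rfl
  | cons x t ih =>
    intro a ha
    have ha' : 1 ≤ max (max a (F x)) (G x) :=
      le_trans ha (le_trans (le_max_left _ _) (le_max_left _ _))
    simp only [List.foldl_cons, List.map_cons, h a x ha]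
    rw [ih _ ha', foldl_max_out]

-- the body of A's outer loop is max (max ans (lineMax row_i)) (lineMax col_i)
lemma step_eq (src : List (List String)) (n : Int) : ∀ (a i : Int), 1 ≤ a →
    (fun ans i =>
      let ansRow :=
        ((PySem.List.pyRange 1 n).foldl (fun (st : Int × Int) j =>
          let cnt := if PySem.List.pyGetD (PySem.List.pyGetD src i []) j "" ==
                        PySem.List.pyGetD (PySem.List.pyGetD src i []) (j - 1) "" then st.1 + 1 else 1
          (cnt, if st.2 < cnt then cnt else st.2)) (1, ans)).2
      ((PySem.List.pyRange 1 n).foldl (fun (st : Int × Int) j =>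
          let cnt := if PySem.List.pyGetD (PySem.List.pyGetD src j []) i "" ==
                        PySem.List.pyGetD (PySem.List.pyGetD src (j - 1) []) i "" then st.1 + 1 else 1
          (cnt, if st.2 < cnt then cnt else st.2)) (1, ansRow)).2) a i
    = max (max a (lineMax ((PySem.List.pyRange 0 n).map (fun j => PySem.List.pyGetD (PySem.List.pyGetD src i []) j ""))))
          (lineMax ((PySem.List.pyRange 0 n).map (fun j => PySem.List.pyGetD (PySem.List.pyGetD src j []) i ""))) := by
  intro a i ha
  have hrow := foldA_eq_runFold (fun j => PySem.List.pyGetD (PySem.List.pyGetD src i []) j "")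
    (PySem.List.pyRange 1 n) (1, a)
  beta_reduce at hrow
  have h1 := runFold_row (fun j => PySem.List.pyGetD (PySem.List.pyGetD src i []) j "") n a ha
  beta_reduce at h1
  have ha2 : 1 ≤ max a (lineMax ((PySem.List.pyRange 0 n).map
      (fun j => PySem.List.pyGetD (PySem.List.pyGetD src i []) j ""))) :=
    le_trans ha (le_max_left _ _)
  have hcol := foldA_eq_runFold (fun j => PySem.List.pyGetD (PySem.List.pyGetD src j []) i "")
    (PySem.List.pyRange 1 n)
    (1, max a (lineMax ((PySem.List.pyRange 0 n).map
      (fun j => PySem.List.pyGetD (PySem.List.pyGetD src i []) j ""))))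
  beta_reduce at hcol
  have h2 := runFold_row (fun j => PySem.List.pyGetD (PySem.List.pyGetD src j []) i "") n _ ha2
  beta_reduce at h2
  simp only [hrow, h1, hcol, h2]

-- ===== VERDICT (by name: the statement is the Claim_ definition above) =====
theorem check_spec : Claim_equal_check := by
  intro n src _hdom _hpre
  unfold Spec_check
  have hA := fold_step_to_max _ _ _ (step_eq src n) (PySem.List.pyRange 0 n) 1 le_rfl
  show check n src = check_alt n src
  unfold check check_alt
  rw [hA, List.foldl_append, List.foldl_map, List.foldl_map, List.foldl_map, List.foldl_map]
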